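-- pv_equiv track=rewrite | github.com/Arsen1302/Code-copy-detector | TestData/solutions/problem_1217_5.py | solution_1217_5
-- ===== SOURCE A (Python) =====
-- def solution_1217_5(s1: str, s2: str) -> bool:
--     if s1 == s2: # i.e diff = 0
--         return True
--
--     if sorted(s1) != sorted(s2):
--         return False
--
--     diff = 0
--     for i, j in zip(s1, s2):
--         if i != j:
--             diff += 1
--
--     return True if diff == 2 else False
-- ===== SOURCE B (Python) =====
-- def solution_1217_5(s1: str, s2: str) -> bool:
--     if len(s1) != len(s2):
--         return False
--     diffs = [(a, b) for a, b in zip(s1, s2) if a != b]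
--     if not diffs:
--         return True
--     if len(diffs) == 2:
--         (a, b), (c, d) = diffs
--         return a == d and b == c
--     return False
-- ===== Notes on version B (the rewrite author's own statement) =====
-- stated objective: alternative
-- what changed: Replaces the sort/multiset comparison plus a separate diff-counting pass with a single pass collecting the differing character pairs and verifying a local swap on them (O(n) algorithmically, though CPython's C-level sorted makes A fast in practice).
import Mathlib
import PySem

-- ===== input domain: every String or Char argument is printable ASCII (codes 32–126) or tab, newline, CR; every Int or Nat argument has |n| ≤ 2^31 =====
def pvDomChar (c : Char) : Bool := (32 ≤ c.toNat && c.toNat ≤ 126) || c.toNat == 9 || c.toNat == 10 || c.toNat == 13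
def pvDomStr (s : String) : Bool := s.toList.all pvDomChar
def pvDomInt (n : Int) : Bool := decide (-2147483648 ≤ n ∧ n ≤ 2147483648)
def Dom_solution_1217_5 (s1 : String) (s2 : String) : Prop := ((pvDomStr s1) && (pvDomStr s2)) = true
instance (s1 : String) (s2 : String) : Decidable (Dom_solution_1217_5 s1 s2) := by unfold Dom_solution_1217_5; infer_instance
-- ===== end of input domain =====

-- B replaces A's sort/multiset comparison + diff-count with one pass collecting the differing pairs and checking a local swap on them (a different, O(n) algorithm; not measured faster in CPython).


-- ===== PORT A =====
-- literal port: s1 == s2 compared as character lists; sorted(s) = PySem.List.sorted on toList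
def solution_1217_5 (s1 : String) (s2 : String) : Bool :=
  let l1 := s1.toList
  let l2 := s2.toList
  if l1 = l2 then true
  else if PySem.List.sorted l1 (fun x => x) false ≠ PySem.List.sorted l2 (fun x => x) false then false
  else
    let diff := (l1.zip l2).foldl (fun d p => if p.1 ≠ p.2 then d + 1 else d) (0 : Nat)
    if diff = 2 then true else false

-- ===== PORT B =====
def solution_1217_5_alt (s1 : String) (s2 : String) : Bool :=
  let l1 := s1.toList
  let l2 := s2.toList
  if l1.length ≠ l2.length then false
  else
    match (l1.zip l2).filter (fun p => p.1 ≠ p.2) with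
    | [] => true
    | [(a, b), (c, d)] => a == d && b == c
    | _ => false

-- ===== PRECONDITION & SPEC =====
def Spec_solution_1217_5 (s1 : String) (s2 : String) (out : Bool) : Prop := out = solution_1217_5_alt s1 s2
instance (s1 : String) (s2 : String) (out : Bool) : Decidable (Spec_solution_1217_5 s1 s2 out) := by unfold Spec_solution_1217_5; infer_instance

-- ===== CLAIM (what is proved, stated in full; the proofs are below) =====
def Claim_equal_solution_1217_5 : Prop := ∀ (s1 : String) (s2 : String), Dom_solution_1217_5 s1 s2 → Spec_solution_1217_5 s1 s2 (solution_1217_5 s1 s2)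

-- ===== LEMMAS AND PROOFS =====

-- the diff-counting fold of A counts the pairs B's filter keeps
lemma pv_foldl_count (zs : List (Char × Char)) (n : Nat) :
    zs.foldl (fun d p => if p.1 ≠ p.2 then d + 1 else d) n
      = n + (zs.filter (fun p => decide (p.1 ≠ p.2))).length := by
  induction zs generalizing n with
  | nil => simp
  | cons p t ih =>
    rw [List.foldl_cons, List.filter_cons]
    by_cases hc : p.1 = p.2
    · rw [if_neg (by simp [hc]), if_neg (by simp [hc]), ih]
    · rw [if_pos (by simp [hc] : p.1 ≠ p.2), if_pos (by simp [hc]), ih, List.length_cons]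
      omega

-- zipping a list with itself leaves no differing pair
lemma pv_zip_self (l : List Char) : (l.zip l).filter (fun p => decide (p.1 ≠ p.2)) = [] := by
  induction l with
  | nil => rfl
  | cons x t ih =>
    rw [List.zip_cons_cons, List.filter_cons, if_neg (by simp)]
    exact ih

-- key balance equation: the two sides of the zip differ exactly by the kept pairs
lemma pv_balance (zs : List (Char × Char)) :
    (↑(zs.map Prod.fst) : Multiset Char)
      + ↑((zs.filter (fun p => decide (p.1 ≠ p.2))).map Prod.snd)
    = (↑(zs.map Prod.snd) : Multiset Char)
      + ↑((zs.filter (fun p => decide (p.1 ≠ p.2))).map Prod.fst) := by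
  induction zs with
  | nil => rfl
  | cons p t ih =>
    obtain ⟨x, y⟩ := p
    rw [List.filter_cons]
    split_ifs with hc <;> simp only [decide_eq_true_eq] at hc
    · simp only [List.map_cons, ← Multiset.cons_coe, Multiset.cons_add, Multiset.add_cons]
      rw [ih]
      exact Multiset.cons_swap y x _
    · obtain rfl : x = y := by simpa using hc
      simp only [List.map_cons, ← Multiset.cons_coe, Multiset.cons_add]
      rw [ih]

-- perm of the two strings ⟺ perm of the differing pairs
lemma pv_perm_iff (zs : List (Char × Char)) :
    (zs.map Prod.fst).Perm (zs.map Prod.snd)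
      ↔ (↑((zs.filter (fun p => decide (p.1 ≠ p.2))).map Prod.fst) : Multiset Char)
          = ↑((zs.filter (fun p => decide (p.1 ≠ p.2))).map Prod.snd) := by
  rw [← Multiset.coe_eq_coe]
  constructor
  · intro h
    have hb := pv_balance zs
    rw [h] at hb
    exact (add_left_cancel hb).symm
  · intro h
    have := pv_balance zs
    rw [← h] at this
    exact add_right_cancel this

-- multiset pair swap characterisation
lemma pv_pair (a b c d : Char) (hab : a ≠ b)
    (h : (↑[a, c] : Multiset Char) = ↑[b, d]) : a = d ∧ b = c := by
  have hmem : a ∈ (↑[b, d] : Multiset Char) := by rw [← h]; simp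
  have h1 : a = b ∨ a = d := by simpa using hmem
  rcases h1 with h1 | h1
  · exact absurd h1 hab
  · subst h1
    have hbm : b ∈ (↑[a, c] : Multiset Char) := by rw [h]; simp
    have h2 : b = a ∨ b = c := by simpa using hbm
    rcases h2 with h2 | h2
    · exact absurd h2.symm hab
    · exact ⟨rfl, h2⟩

-- if the lengths are equal the zip projects back to the two lists
lemma pv_proj (l1 l2 : List Char) (h : l1.length = l2.length) :
    (l1.zip l2).map Prod.fst = l1 ∧ (l1.zip l2).map Prod.snd = l2 :=
  ⟨List.map_fst_zip (le_of_eq h), List.map_snd_zip (le_of_eq h.symm)⟩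

-- empty diff list means the strings are equal
lemma pv_nil_eq (l1 l2 : List Char) (h : l1.length = l2.length)
    (hf : (l1.zip l2).filter (fun p => decide (p.1 ≠ p.2)) = []) : l1 = l2 := by
  obtain ⟨h1, h2⟩ := pv_proj l1 l2 h
  have hm : List.map Prod.fst (l1.zip l2) = List.map Prod.snd (l1.zip l2) :=
    List.map_congr_left (fun p hp => by
      have := List.filter_eq_nil_iff.mp hf p hp
      simpa using this)
  rw [h1, h2] at hm
  exact hm

theorem solution_1217_5_spec_aux (s1 s2 : String) :
    solution_1217_5 s1 s2 = solution_1217_5_alt s1 s2 := by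
  simp only [solution_1217_5, solution_1217_5_alt]
  by_cases hlen : s1.toList.length = s2.toList.length
  · -- equal lengths
    rw [if_neg (show ¬ (s1.toList.length ≠ s2.toList.length) from by simp [hlen])]
    obtain ⟨hp1, hp2⟩ := pv_proj _ _ hlen
    have hcount := pv_foldl_count (s1.toList.zip s2.toList) 0
    rw [Nat.zero_add] at hcount
    have hsiff : (PySem.List.sorted s1.toList (fun x => x) false
          = PySem.List.sorted s2.toList (fun x => x) false)
        ↔ (↑(((s1.toList.zip s2.toList).filter (fun p => decide (p.1 ≠ p.2))).map Prod.fst) : Multiset Char)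
          = ↑(((s1.toList.zip s2.toList).filter (fun p => decide (p.1 ≠ p.2))).map Prod.snd) := by
      rw [PySem.List.sorted_id_eq_sorted_id_iff_perm]
      constructor
      · intro h
        exact (pv_perm_iff _).mp (by rw [hp1, hp2]; exact h)
      · intro h
        have := (pv_perm_iff _).mpr h
        rwa [hp1, hp2] at this
    have hne_of_ds : (s1.toList.zip s2.toList).filter (fun p => decide (p.1 ≠ p.2)) ≠ [] →
        s1.toList ≠ s2.toList := by
      intro hdsne heq
      exact hdsne (by rw [heq]; exact pv_zip_self s2.toList)
    rcases hd : (s1.toList.zip s2.toList).filter (fun p => decide (p.1 ≠ p.2)) with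
      _ | ⟨⟨a, b⟩, _ | ⟨⟨c, d⟩, _ | ⟨p3, rest⟩⟩⟩
    · -- no differing pairs: both sides true
      have heq : s1.toList = s2.toList := pv_nil_eq _ _ hlen hd
      rw [if_pos heq, hd]
    · -- exactly one differing pair: both sides false
      have hab : a ≠ b := by
        have hm : (a, b) ∈ (s1.toList.zip s2.toList).filter (fun p => decide (p.1 ≠ p.2)) := by
          rw [hd]; simp
        simpa using List.of_mem_filter hm
      rw [if_neg (hne_of_ds (by rw [hd]; simp)), hd]
      split_ifs with hs h2
      · rfl
      · exfalso
        rw [hcount, hd] at h2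
        simp at h2
      · rfl
    · -- exactly two differing pairs: A tests the multiset, B tests the swap
      have hab : a ≠ b := by
        have hm : (a, b) ∈ (s1.toList.zip s2.toList).filter (fun p => decide (p.1 ≠ p.2)) := by
          rw [hd]; simp
        simpa using List.of_mem_filter hm
      rw [hd] at hsiff
      rw [if_neg (hne_of_ds (by rw [hd]; simp)), hd]
      split_ifs with hs h2
      · -- sorted lists differ: no swap possible
        have hsw : ¬(a = d ∧ b = c) := by
          rintro ⟨had, hbc⟩
          subst had; subst hbc
          exact hs (hsiff.mpr (by simpa using List.Perm.swap b a []))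
        symm
        rw [← Bool.not_eq_true, Bool.and_eq_true, beq_iff_eq, beq_iff_eq]
        exact hsw
      · -- sorted lists equal and two diffs: the two pairs form a swap
        rw [not_not] at hs
        have hm : (↑[a, c] : Multiset Char) = ↑[b, d] := by
          have := hsiff.mp hs
          simpa using this
        obtain ⟨had, hbc⟩ := pv_pair a b c d hab hm
        simp [had, hbc]
      · -- sorted equal but diff count ≠ 2: impossible with two differing pairs
        exfalso
        rw [hcount, hd] at h2
        simp at h2
    · -- three or more differing pairs: both sides false
      rw [if_neg (hne_of_ds (by rw [hd]; simp)), hd]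
      split_ifs with hs h2
      · rcases p3 with ⟨e, f⟩
        rfl
      · exfalso
        rw [hcount, hd] at h2
        simp at h2
      · rcases p3 with ⟨e, f⟩
        rfl
  · -- lengths differ: strings unequal, sorted lists unequal
    have hne : s1.toList ≠ s2.toList := fun h => hlen (by rw [h])
    have hsne : PySem.List.sorted s1.toList (fun x => x) false
        ≠ PySem.List.sorted s2.toList (fun x => x) false := by
      intro h
      apply hlen
      have e1 := PySem.List.length_sorted s1.toList (fun x => x) false
      have e2 := PySem.List.length_sorted s2.toList (fun x => x) false
      rw [← e1, ← e2, h]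
    rw [if_neg hne, if_pos hsne, if_pos hlen]

-- ===== VERDICT (by name: the statement is the Claim_ definition above) =====
theorem solution_1217_5_spec : Claim_equal_solution_1217_5 := by
  intro s1 s2 _
  exact solution_1217_5_spec_aux s1 s2
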